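-- pv_equiv track=rewrite | github.com/MarquisIQ/note_manager | menu.py | create_answer_variants
-- ===== SOURCE A (Python) =====
-- def create_answer_variants(variants, mapping_variants=None):
--     processed_variants = ''
--     if mapping_variants:
--         if type(variants) == list:
--             for index in range(len(variants)):
--                 processed_variants += f'{index + 1}. {mapping_variants[variants[index]]}\n'
--         elif type(variants) == dict:
--             for index, key in enumerate(variants.keys()):
--                 processed_variants += f'{index + 1}. {mapping_variants[variants[key]]}\n'
--     else:
--         if type(variants) == list:
--             for index in range(len(variants)):
--                 processed_variants += f'{index + 1}. {variants[index]}\n'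
--         elif type(variants) == dict:
--             for index, key in enumerate(variants.keys()):
--                 processed_variants += f'{index + 1}. {variants[key]}\n'
--     return processed_variants[:-1]
-- ===== SOURCE B (Python) =====
-- def create_answer_variants(variants, mapping_variants=None):
--     if type(variants) == list:
--         values = variants
--     elif type(variants) == dict:
--         values = list(variants.values())
--     else:
--         values = []
--     out = ''
--     i = len(values)
--     while i:
--         i -= 1
--         v = mapping_variants[values[i]] if mapping_variants else values[i]
--         line = f'{i + 1}. {v}'
--         out = line if not out else line + '\n' + out
--     return out
-- ===== Notes on version B (the rewrite author's own statement) =====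
-- stated objective: alternative
-- what changed: Replaces A's forward index loop that appends '\n'-terminated pieces and slices the last char off with a backward while loop building the result from the last line to the first, prepending 'line + \n + rest' so no trailing separator ever exists.
import Mathlib
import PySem

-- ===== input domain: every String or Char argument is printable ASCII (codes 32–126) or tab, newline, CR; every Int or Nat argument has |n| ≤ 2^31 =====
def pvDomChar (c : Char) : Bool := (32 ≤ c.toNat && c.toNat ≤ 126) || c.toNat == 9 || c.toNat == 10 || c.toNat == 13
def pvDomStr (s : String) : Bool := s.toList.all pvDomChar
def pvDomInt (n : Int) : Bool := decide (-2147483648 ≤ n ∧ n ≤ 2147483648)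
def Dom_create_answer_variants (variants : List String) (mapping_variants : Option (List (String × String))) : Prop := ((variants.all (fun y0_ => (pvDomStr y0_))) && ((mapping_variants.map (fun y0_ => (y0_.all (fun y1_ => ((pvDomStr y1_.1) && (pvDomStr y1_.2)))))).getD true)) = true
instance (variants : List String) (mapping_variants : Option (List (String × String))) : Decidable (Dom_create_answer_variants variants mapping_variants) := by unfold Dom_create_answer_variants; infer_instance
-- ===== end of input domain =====

-- B replaces A's forward index loop that accumulates a '\n'-terminated string and slices it off
-- with a backward while loop that builds the result from the last line to the first, prepending
-- '\n' + rest only when something was already built (objective: alternative).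

-- ===== PORT A =====
-- `for index in range(len(variants)): processed += f'{index+1}. {…}\n'`, then `processed[:-1]`.
-- `mapping_variants[v]` is a dict lookup (KeyError when absent — excluded by Pre_); ported as the
-- total form `(m.lookup v).getD ""`, exact on Pre_. The `type(variants) == dict` / other-type
-- branches are unrepresentable under the fixed signature (variants : List String).
def create_answer_variants (variants : List String) (mapping_variants : Option (List (String × String))) : String :=
  let processed : String :=
    match mapping_variants with
    | some (p :: ps) =>   -- `if mapping_variants:` (a non-empty dict is truthy)
        (PySem.List.pyRange 0 (PySem.List.len variants) 1).foldl
          (fun acc index =>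
            acc ++ PySem.Int.toStr (index + 1) ++ ". " ++
              (((p :: ps).lookup (PySem.List.pyGetD variants index "")).getD "") ++ "\n")
          ""
    | _ =>                -- None or empty dict: falsy
        (PySem.List.pyRange 0 (PySem.List.len variants) 1).foldl
          (fun acc index =>
            acc ++ PySem.Int.toStr (index + 1) ++ ". " ++ PySem.List.pyGetD variants index "" ++ "\n")
          ""
  PySem.Str.slice processed none (some (-1))

-- ===== PORT B =====
-- `mapping_variants[values[i]] if mapping_variants else values[i]` (KeyError excluded by Pre_)
def pvMapVal (mapping_variants : Option (List (String × String))) (v : String) : String :=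
  match mapping_variants with
  | none => v
  | some [] => v
  | some (p :: ps) => ((p :: ps).lookup v).getD ""

-- the `while i: i -= 1; … ; out = line if not out else line + '\n' + out` loop, i counting down
def pvBLoop (values : List String) (mapping_variants : Option (List (String × String))) : Nat → String → String
  | 0, out => out
  | Nat.succ i, out =>
      let v : String := pvMapVal mapping_variants (PySem.List.pyGetD values (i : Int) "")
      let line : String := PySem.Int.toStr ((i : Int) + 1) ++ ". " ++ v
      pvBLoop values mapping_variants i (if out = "" then line else line ++ "\n" ++ out)

def create_answer_variants_alt (variants : List String) (mapping_variants : Option (List (String × String))) : String :=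
  pvBLoop variants mapping_variants variants.length ""

-- ===== PRECONDITION & SPEC =====
-- Pre_ excludes exactly the KeyError inputs: a truthy (non-empty) mapping missing some variant,
-- where both A and B raise.
def Pre_create_answer_variants (variants : List String) (mapping_variants : Option (List (String × String))) : Prop :=
  mapping_variants.getD [] ≠ [] → ∀ v ∈ variants, ((mapping_variants.getD []).lookup v).isSome = true
instance (variants : List String) (mapping_variants : Option (List (String × String))) : Decidable (Pre_create_answer_variants variants mapping_variants) := by unfold Pre_create_answer_variants; infer_instance
def pvWitness_create_answer_variants : List String × (Option (List (String × String))) := (["a", "b"], some [("a", "A"), ("b", "B")])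

def Spec_create_answer_variants (variants : List String) (mapping_variants : Option (List (String × String))) (out : String) : Prop := out = create_answer_variants_alt variants mapping_variants
instance (variants : List String) (mapping_variants : Option (List (String × String))) (out : String) : Decidable (Spec_create_answer_variants variants mapping_variants out) := by unfold Spec_create_answer_variants; infer_instance

-- ===== CLAIM (what is proved, stated in full; the proofs are below) =====
def Claim_equal_create_answer_variants : Prop := ∀ (variants : List String) (mapping_variants : Option (List (String × String))), Dom_create_answer_variants variants mapping_variants → Pre_create_answer_variants variants mapping_variants → Spec_create_answer_variants variants mapping_variants (create_answer_variants variants mapping_variants)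

-- ===== LEMMAS AND PROOFS =====

-- the list of formatted lines both programs produce, in order (index j : Int)
def pvLineF (m : Option (List (String × String))) (xs : List String) (j : Int) : String :=
  PySem.Int.toStr (j + 1) ++ ". " ++ pvMapVal m (PySem.List.pyGetD xs j "")

def pvLines (m : Option (List (String × String))) (xs : List String) (n : Nat) : List String :=
  (PySem.List.pyRange 0 (n : Int) 1).map (pvLineF m xs)

lemma str_ne_empty_of_toList (s : String) (h : s.toList ≠ []) : s ≠ "" := by
  intro he; exact h (by simp [he])

lemma line_ne_empty (k : Int) (v : String) : PySem.Int.toStr k ++ ". " ++ v ≠ "" := by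
  apply str_ne_empty_of_toList
  simp [String.toList_append]

lemma sep_append_ne_empty (a b : String) : a ++ "\n" ++ b ≠ "" := by
  apply str_ne_empty_of_toList
  simp [String.toList_append]

-- string-level join facts (via the Chars lemmas)
lemma str_join_snoc_split (L : List String) (a b : String) :
    PySem.Str.join "\n" (L ++ [a ++ "\n" ++ b]) = PySem.Str.join "\n" (L ++ [a, b]) := by
  apply String.toList_inj.mp
  rw [PySem.Str.toList_join, PySem.Str.toList_join]
  have hsep : ("\n" : String).toList = ['\n'] := by decide
  induction L with
  | nil => simp [PySem.Chars.join_singleton, PySem.Chars.join_cons_cons, hsep, String.toList_append]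
  | cons x rest ih =>
      cases rest with
      | nil =>
          simp only [List.map_cons, List.map_nil, List.nil_append, List.cons_append,
            PySem.Chars.join_cons_cons, PySem.Chars.join_singleton, hsep, String.toList_append]
      | cons y rest' =>
          simp only [List.map_cons, List.cons_append, PySem.Chars.join_cons_cons] at ih ⊢
          rw [List.append_assoc, List.append_assoc]
          congr 1
          congr 1

-- "join lines so far, then the pending suffix out (if any)"
def pvCombine (L : List String) (out : String) : String :=
  if out = "" then PySem.Str.join "\n" L else PySem.Str.join "\n" (L ++ [out])

-- B's backward loop computes pvCombine of the first i lines
lemma pvBLoop_eq (xs : List String) (m : Option (List (String × String))) :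
    ∀ (i : Nat) (out : String), pvBLoop xs m i out = pvCombine (pvLines m xs i) out := by
  intro i
  induction i with
  | zero =>
      intro out
      by_cases h : out = "" <;>
        simp [pvBLoop, pvCombine, pvLines, h, PySem.Str.join]
  | succ i ih =>
      intro out
      have hline : pvLines m xs (i + 1) = pvLines m xs i ++
          [PySem.Int.toStr ((i : Int) + 1) ++ ". " ++ pvMapVal m (PySem.List.pyGetD xs (i : Int) "")] := by
        unfold pvLines
        rw [show ((i + 1 : Nat) : Int) = (i : Int) + 1 by push_cast; ring,
          PySem.List.pyRange_one_succ_right (by positivity), List.map_append]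
        rfl
      by_cases h : out = ""
      · subst h
        rw [show pvBLoop xs m (i+1) "" = pvBLoop xs m i
              (PySem.Int.toStr ((i : Int) + 1) ++ ". " ++ pvMapVal m (PySem.List.pyGetD xs (i : Int) "")) from by
              simp [pvBLoop]]
        rw [ih, hline, pvCombine, pvCombine]
        rw [if_neg (line_ne_empty _ _)]
        simp
      · rw [show pvBLoop xs m (i+1) out = pvBLoop xs m i
              ((PySem.Int.toStr ((i : Int) + 1) ++ ". " ++ pvMapVal m (PySem.List.pyGetD xs (i : Int) "")) ++ "\n" ++ out) from by
              simp [pvBLoop, h]]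
        rw [ih, hline, pvCombine, pvCombine]
        rw [if_neg (sep_append_ne_empty _ _), if_neg h]
        rw [str_join_snoc_split]
        simp

-- chars level: dropping the last char of "each piece followed by c" is join with separator c
lemma dropLast_flatMap_concat (c : Char) (cs : List (List Char)) :
    (cs.flatMap (fun s => s ++ [c])).dropLast = PySem.Chars.join [c] cs := by
  induction cs with
  | nil => simp [PySem.Chars.join_nil]
  | cons x rest ih =>
    cases rest with
    | nil => simp [PySem.Chars.join_singleton]
    | cons y rest' =>
      have hne : (y :: rest').flatMap (fun s => s ++ [c]) ≠ [] := by simp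
      rw [List.flatMap_cons, List.dropLast_append_of_ne_nil hne, ih,
        PySem.Chars.join_cons_cons]

-- string level: A's accumulate-then-[:-1] equals '\n'.join
lemma slice_foldl_eq_join (ls : List String) :
    PySem.Str.slice (ls.foldl (fun acc s => acc ++ (s ++ "\n")) "") none (some (-1))
      = PySem.Str.join "\n" ls := by
  have htl : ∀ (a : String),
      (ls.foldl (fun acc s => acc ++ (s ++ "\n")) a).toList
        = a.toList ++ ls.flatMap (fun s => s.toList ++ ['\n']) := by
    induction ls with
    | nil => intro a; simp
    | cons x rest ih =>
      intro a
      simp only [List.foldl_cons, List.flatMap_cons, ih, String.toList_append]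
      have : ("\n" : String).toList = ['\n'] := by decide
      simp [this]
  apply String.toList_inj.mp
  rw [PySem.Str.slice_to_neg_one, PySem.Str.toList_join, htl]
  have h : ls.flatMap (fun s => s.toList ++ ['\n'])
      = (ls.map String.toList).flatMap (fun s => s ++ ['\n']) := by
    simp [List.flatMap_map]
  have hsep : ("\n" : String).toList = ['\n'] := by decide
  simp only [h, hsep, String.toList_empty, List.nil_append,
    dropLast_flatMap_concat]

-- A's loop (for one mapping case, the per-value transform abstracted as g) equals the joined lines
lemma a_side (g : String → String) (xs : List String) :
    PySem.Str.slice
        ((PySem.List.pyRange 0 (PySem.List.len xs) 1).foldl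
          (fun acc j => acc ++ PySem.Int.toStr (j + 1) ++ ". " ++ g (PySem.List.pyGetD xs j "") ++ "\n") "")
        none (some (-1))
      = PySem.Str.join "\n"
          ((PySem.List.pyRange 0 (xs.length : Int) 1).map
            (fun j => PySem.Int.toStr (j + 1) ++ ". " ++ g (PySem.List.pyGetD xs j ""))) := by
  rw [← slice_foldl_eq_join ((PySem.List.pyRange 0 (xs.length : Int) 1).map
      (fun j => PySem.Int.toStr (j + 1) ++ ". " ++ g (PySem.List.pyGetD xs j "")))]
  rw [List.foldl_map, PySem.List.len_eq]
  simp only [String.append_assoc]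

-- ===== VERDICT (by name: the statement is the Claim_ definition above) =====
theorem create_answer_variants_spec : Claim_equal_create_answer_variants := by
  intro variants mapping_variants _ _
  unfold Spec_create_answer_variants create_answer_variants create_answer_variants_alt
  rw [pvBLoop_eq]
  match mapping_variants with
  | some (p :: ps) =>
      simpa [pvCombine, pvLines, pvMapVal] using
        a_side (fun v => ((p :: ps).lookup v).getD "") variants
  | some [] =>
      simpa [pvCombine, pvLines, pvMapVal] using a_side (fun v => v) variants
  | none =>
      simpa [pvCombine, pvLines, pvMapVal] using a_side (fun v => v) variants
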